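-- pv_equiv track=rewrite | github.com/jahnavipurohit/PDSA_IITM | week10/PPA2.py | PrefixMatch
-- ===== SOURCE A (Python) =====
-- def PrefixMatch(s):
--     n = len(s)
--     lps = [0] * n   # prefix function (KMP)
--
--     # Build lps array
--     j = 0
--     for i in range(1, n):
--         while j > 0 and s[i] != s[j]:
--             j = lps[j - 1]
--         if s[i] == s[j]:
--             j += 1
--             lps[i] = j
--
--     result = set()
--     sub = s[1:]   # only substrings from s[1:]
--
--     # For every prefix length
--     for l in range(1, n):
--         prefix = s[:l]
--         if prefix in sub:  # occurs in s[1:]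
--             result.add(prefix)
--
--     return result
-- ===== SOURCE B (Python) =====
-- def PrefixMatch(s):
--     # If a prefix of length l occurs in s[1:], so does every shorter prefix, so
--     # containment is monotone in l: binary-search the largest such l (O(log n)
--     # substring tests instead of one per length) and return the prefixes 1..lo.
--     sub = s[1:]
--     lo, hi = 0, len(s) - 1
--     while lo < hi:
--         mid = (lo + hi + 1) // 2
--         if s[:mid] in sub:
--             lo = mid
--         else:
--             hi = mid - 1
--     return {s[:l] for l in range(1, lo + 1)}
-- ===== Notes on version B (the rewrite author's own statement) =====
-- stated objective: faster
-- what changed: A substring-searches s[1:] once for every prefix length (after building a KMP lps table it never uses); B exploits that containment is monotone in the prefix length and binary-searches the largest occurring length (O(log n) substring tests instead of n), then emits the prefixes 1..lo directly.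
import Mathlib
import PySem

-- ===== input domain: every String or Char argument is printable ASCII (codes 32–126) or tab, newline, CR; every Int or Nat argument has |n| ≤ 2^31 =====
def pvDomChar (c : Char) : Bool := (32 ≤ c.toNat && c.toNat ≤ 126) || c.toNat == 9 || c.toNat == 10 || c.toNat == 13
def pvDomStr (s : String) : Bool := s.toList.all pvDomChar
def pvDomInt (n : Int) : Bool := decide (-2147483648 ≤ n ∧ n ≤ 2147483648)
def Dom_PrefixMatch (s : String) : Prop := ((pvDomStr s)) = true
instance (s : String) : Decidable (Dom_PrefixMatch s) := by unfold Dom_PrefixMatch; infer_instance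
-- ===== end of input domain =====

-- B replaces A's one-substring-search-per-prefix-length by a binary search for the
-- largest prefix length occurring in s[1:] (containment is monotone in the length).

-- ===== PORT A =====
-- the KMP while loop 'while j > 0 and s[i] != s[j]: j = lps[j-1]'; the fuel only
-- guards totality (in Python j strictly decreases), it never changes the result
def pvLpsWhile (cs : List Char) (lps : List Int) (i : Int) : Nat → Int → Int
  | 0, j => j
  | fuel + 1, j =>
    if 0 < j ∧ ¬ (PySem.List.pyGet? cs i = PySem.List.pyGet? cs j)
    then pvLpsWhile cs lps i fuel (PySem.List.pyGetD lps (j - 1) 0)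
    else j

-- 'lps = [0]*n; j = 0; for i in range(1, n): … j += 1; lps[i] = j' — builds (lps, j)
def pvLpsBuild (cs : List Char) : List Int × Int :=
  (PySem.List.pyRange 1 (cs.length : Int) 1).foldl
    (fun st i =>
      let j := pvLpsWhile cs st.1 i cs.length st.2
      if PySem.List.pyGet? cs i = PySem.List.pyGet? cs j
      then (PySem.List.pySetD st.1 i (j + 1), j + 1)
      else (st.1, j))
    (List.replicate cs.length 0, 0)

def PrefixMatch (s : String) : List String :=
  let n : Int := PySem.Str.len s
  let _lps := pvLpsBuild s.toList   -- built as in A; its value is never read afterwards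
  let sub := PySem.Str.slice s (some 1) none
  (PySem.List.pyRange 1 n 1).foldl
    (fun result l =>
      let pre := PySem.Str.slice s none (some l)
      if PySem.Str.isIn pre sub = true then PySem.Set.add result pre else result)
    PySem.Set.empty

-- ===== PORT B =====
-- 'while lo < hi: mid = (lo+hi+1)//2; if s[:mid] in sub: lo = mid else: hi = mid-1'
def pvSearch (s sub : String) (lo hi : Int) : Int :=
  if lo < hi then
    let mid := PySem.Int.floordiv (lo + hi + 1) 2
    if PySem.Str.isIn (PySem.Str.slice s none (some mid)) sub = true
    then pvSearch s sub mid hi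
    else pvSearch s sub lo (mid - 1)
  else lo
termination_by (hi - lo).toNat
decreasing_by
  all_goals
    simp only [PySem.Int.floordiv_eq_ediv_of_pos (by norm_num : (0:Int) < 2)]
    omega

def PrefixMatch_alt (s : String) : List String :=
  let sub := PySem.Str.slice s (some 1) none
  let lo := pvSearch s sub 0 (PySem.Str.len s - 1)
  PySem.Set.ofList
    ((PySem.List.pyRange 1 (lo + 1) 1).map
      (fun l => PySem.Str.slice s none (some l)))

-- ===== PRECONDITION & SPEC =====
def Spec_PrefixMatch (s : String) (out : List String) : Prop := out = PrefixMatch_alt s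
instance (s : String) (out : List String) : Decidable (Spec_PrefixMatch s out) := by unfold Spec_PrefixMatch; infer_instance

-- ===== CLAIM (what is proved, stated in full; the proofs are below) =====
def Claim_equal_PrefixMatch : Prop := ∀ (s : String), Dom_PrefixMatch s → Spec_PrefixMatch s (PrefixMatch s)

-- ===== LEMMAS AND PROOFS =====

-- monotonicity: if the prefix of length l occurs in sub, so does any shorter prefix
theorem occurs_mono (s sub : String) (l l' : Int) (h0 : 0 ≤ l') (hll : l' ≤ l)
    (h : PySem.Str.isIn (PySem.Str.slice s none (some l)) sub = true) :
    PySem.Str.isIn (PySem.Str.slice s none (some l')) sub = true := by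
  rw [PySem.Str.isIn_iff_infix] at h ⊢
  have hl0 : (0:Int) ≤ l := le_trans h0 hll
  have h1 : (PySem.Str.slice s none (some l)).toList = s.toList.take l.toNat := by
    simp [PySem.List.slice_to _ hl0]
  have h2 : (PySem.Str.slice s none (some l')).toList = s.toList.take l'.toNat := by
    simp [PySem.List.slice_to _ h0]
  rw [h1] at h
  rw [h2]
  have hp : s.toList.take l'.toNat <+: s.toList.take l.toNat := by
    rw [show l'.toNat = min l'.toNat l.toNat by omega, ← List.take_take]
    exact List.take_prefix _ _
  exact hp.isInfix.trans h

-- the binary search returns the largest l with s[:l] occurring in s[1:]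
theorem pvSearch_spec (s : String) (lo hi : Int)
    (hlohi : lo ≤ hi) (h0 : 0 ≤ lo)
    (hlo : PySem.Str.isIn (PySem.Str.slice s none (some lo)) (PySem.Str.slice s (some 1) none) = true)
    (hhi : ∀ l : Int, hi < l → ¬ PySem.Str.isIn (PySem.Str.slice s none (some l)) (PySem.Str.slice s (some 1) none) = true) :
    lo ≤ pvSearch s (PySem.Str.slice s (some 1) none) lo hi ∧
    pvSearch s (PySem.Str.slice s (some 1) none) lo hi ≤ hi ∧
    PySem.Str.isIn (PySem.Str.slice s none (some (pvSearch s (PySem.Str.slice s (some 1) none) lo hi))) (PySem.Str.slice s (some 1) none) = true ∧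
    ∀ l : Int, pvSearch s (PySem.Str.slice s (some 1) none) lo hi < l →
      ¬ PySem.Str.isIn (PySem.Str.slice s none (some l)) (PySem.Str.slice s (some 1) none) = true := by
  fun_induction pvSearch s (PySem.Str.slice s (some 1) none) lo hi with
  | case1 lo hi h mid hc ih =>
    have hmid : lo < mid ∧ mid ≤ hi := by
      simp only [mid, PySem.Int.floordiv_eq_ediv_of_pos (by norm_num : (0:Int) < 2)]
      omega
    obtain ⟨i1, i2, i3, i4⟩ := ih (by omega) (by omega) hc hhi
    exact ⟨by omega, i2, i3, i4⟩
  | case2 lo hi h mid hc ih =>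
    have hmid : lo < mid ∧ mid ≤ hi := by
      simp only [mid, PySem.Int.floordiv_eq_ediv_of_pos (by norm_num : (0:Int) < 2)]
      omega
    have hhi' : ∀ l : Int, mid - 1 < l → ¬ PySem.Str.isIn (PySem.Str.slice s none (some l)) (PySem.Str.slice s (some 1) none) = true := by
      intro l hl hcon
      exact hc (occurs_mono s _ l mid (by omega) (by omega) hcon)
    obtain ⟨i1, i2, i3, i4⟩ := ih (by omega) h0 hlo hhi'
    exact ⟨i1, by omega, i3, i4⟩
  | case3 lo hi h =>
    exact ⟨le_refl _, hlohi, hlo, fun l hl => hhi l (by omega)⟩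

theorem foldl_id {α β : Type} (xs : List β) (a : α) :
    xs.foldl (fun r _ => r) a = a := by
  induction xs generalizing a <;> simp_all

-- the empty prefix always occurs
theorem occurs_zero (s : String) :
    PySem.Str.isIn (PySem.Str.slice s none (some 0)) (PySem.Str.slice s (some 1) none) = true := by
  rw [PySem.Str.isIn_iff_infix]
  have h : (PySem.Str.slice s none (some 0)).toList = [] := by
    simp [PySem.List.slice_to _ (le_refl (0:Int))]
  rw [h]
  exact List.nil_infix

-- no prefix of length ≥ n occurs in s[1:] (too long)
theorem occurs_top (s : String) (l : Int) (hpos : 0 < s.toList.length) (hl : (s.toList.length : Int) - 1 < l) :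
    ¬ PySem.Str.isIn (PySem.Str.slice s none (some l)) (PySem.Str.slice s (some 1) none) = true := by
  intro h
  rw [PySem.Str.isIn_iff_infix] at h
  have h0 : (0:Int) ≤ l := by omega
  have h1 : (PySem.Str.slice s none (some l)).toList = s.toList.take l.toNat := by
    simp [PySem.List.slice_to _ h0]
  have h2 : (PySem.Str.slice s (some 1) none).toList = s.toList.tail := by
    simp [PySem.List.slice_from_one]
  rw [h1, h2] at h
  have hle := h.length_le
  simp only [List.length_take, List.length_tail] at hle
  omega

-- the two foldl/comprehension shapes of the ports agree
theorem pvFoldEq (s : String) :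
    (List.foldl (fun result l =>
      if PySem.Str.isIn (PySem.Str.slice s none (some l)) (PySem.Str.slice s (some 1) none) = true
      then PySem.Set.add result (PySem.Str.slice s none (some l)) else result)
      PySem.Set.empty (PySem.List.pyRange 1 (PySem.Str.len s)))
    = PySem.Set.ofList
      ((PySem.List.pyRange 1 (pvSearch s (PySem.Str.slice s (some 1) none) 0 (PySem.Str.len s - 1) + 1)).map
        (fun l => PySem.Str.slice s none (some l))) := by
  have hlen : PySem.Str.len s = (s.toList.length : Int) := by simp
  rw [hlen]
  set n : Int := (s.toList.length : Int) with hn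
  by_cases hpos : 0 < n
  case neg =>
    -- empty string: both ranges are empty
    have hn0 : n = 0 := by simp only [hn]; omega
    have hr : pvSearch s (PySem.Str.slice s (some 1) none) 0 (n - 1) = 0 := by
      rw [pvSearch]
      simp [hn0]
    rw [hr, hn0]
    simp [PySem.List.pyRange_one_eq_nil, PySem.Set.empty, PySem.Set.ofList]
  case pos =>
    obtain ⟨hr0, hrn, hrocc, hrtop⟩ :=
      pvSearch_spec s 0 (n - 1) (by omega) (le_refl 0) (occurs_zero s)
        (fun l hl => occurs_top s l (by omega) (by omega))
    set r := pvSearch s (PySem.Str.slice s (some 1) none) 0 (n - 1) with hrdef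
    have hcond : ∀ (acc : PySem.Set String), ∀ l ∈ PySem.List.pyRange 1 n,
        (if PySem.Str.isIn (PySem.Str.slice s none (some l)) (PySem.Str.slice s (some 1) none) = true
         then PySem.Set.add acc (PySem.Str.slice s none (some l)) else acc)
        = (if l ≤ r then PySem.Set.add acc (PySem.Str.slice s none (some l)) else acc) := by
      intro acc l hl
      rw [PySem.List.mem_pyRange_one] at hl
      have hiff : (PySem.Str.isIn (PySem.Str.slice s none (some l)) (PySem.Str.slice s (some 1) none) = true) ↔ (l ≤ r) := by
        constructor
        · intro h
          by_contra hgt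
          exact hrtop l (by omega) h
        · intro h
          exact occurs_mono s _ r l (by omega) h hrocc
      rw [if_congr hiff rfl rfl]
    rw [PySem.List.foldl_congr_mem _ _ _ _ hcond,
      PySem.List.pyRange_one_append 1 (r + 1) n (by omega) (by omega),
      List.foldl_append]
    have hfirst : ∀ (acc : PySem.Set String), ∀ l ∈ PySem.List.pyRange 1 (r + 1),
        (if l ≤ r then PySem.Set.add acc (PySem.Str.slice s none (some l)) else acc)
        = PySem.Set.add acc (PySem.Str.slice s none (some l)) := by
      intro acc l hl
      rw [PySem.List.mem_pyRange_one] at hl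
      exact if_pos (by omega)
    have hsecond : ∀ (acc : PySem.Set String), ∀ l ∈ PySem.List.pyRange (r + 1) n,
        (if l ≤ r then PySem.Set.add acc (PySem.Str.slice s none (some l)) else acc)
        = acc := by
      intro acc l hl
      rw [PySem.List.mem_pyRange_one] at hl
      exact if_neg (by omega)
    rw [PySem.List.foldl_congr_mem _ _ _ _ hsecond, foldl_id,
      PySem.List.foldl_congr_mem _ _ _ _ hfirst,
      ← PySem.Set.update_map_eq_foldl_add]
    rw [show (PySem.Set.empty : PySem.Set String) = [] from rfl, PySem.Set.update_nil_left]

-- ===== VERDICT (by name: the statement is the Claim_ definition above) =====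
theorem PrefixMatch_spec : Claim_equal_PrefixMatch := by
  intro s _
  show PrefixMatch s = PrefixMatch_alt s
  unfold PrefixMatch PrefixMatch_alt
  exact pvFoldEq s
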